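-- pv_equiv track=rewrite | github.com/martibook/CodeForces | HuaweiTest/B.py | byte2bits
-- ===== SOURCE A (Python) =====
-- def byte2bits(s):
--     int_n = [int(x) for x in list(s[2:])]
--     str_n4 = []
--
--     for n in int_n:
--         bits4 = []
--         while n != 0:
--             q, r = divmod(n, 2)
--             bits4.append(r)
--             n = q
--         bits4.reverse()
--         l = [0 for i in range(4 - len(bits4))] + bits4
--         s = [str(e) for e in l]
--         str_n4.append(''.join(s))
--
--     return ''.join(str_n4)
-- ===== SOURCE B (Python) =====
-- _TABLE = {'0': '0000', '1': '0001', '2': '0010', '3': '0011', '4': '0100',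
--           '5': '0101', '6': '0110', '7': '0111', '8': '1000', '9': '1001'}
--
--
-- def byte2bits(s):
--     return ''.join(_TABLE[c] for c in s[2:])
-- ===== Notes on version B (the rewrite author's own statement) =====
-- stated objective: idiomatic
-- what changed: Replaces the per-digit divmod/reverse/pad loop with a precomputed digit-to-4-bit lookup table built once, joining the table entries for s[2:].
import Mathlib
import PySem

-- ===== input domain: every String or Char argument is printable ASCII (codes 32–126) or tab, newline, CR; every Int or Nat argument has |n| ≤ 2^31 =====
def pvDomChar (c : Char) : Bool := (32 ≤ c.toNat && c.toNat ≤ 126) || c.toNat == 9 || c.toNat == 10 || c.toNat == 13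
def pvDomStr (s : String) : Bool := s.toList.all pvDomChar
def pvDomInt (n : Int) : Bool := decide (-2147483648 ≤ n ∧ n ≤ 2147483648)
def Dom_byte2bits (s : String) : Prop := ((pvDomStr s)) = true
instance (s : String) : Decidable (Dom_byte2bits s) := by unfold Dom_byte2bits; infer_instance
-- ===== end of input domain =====

-- B replaces A's per-digit divmod/reverse/pad arithmetic with one precomputed
-- digit → 4-bit-string lookup table (idiomatic, same cost).

-- ===== PORT A =====
-- while n != 0: q, r = divmod(n, 2); bits4.append(r); n = q
-- (inside Pre_ every n is a digit 0..9, so recursing on the Nat value is exact)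
-- structural fuel (fuel := n suffices since n/2 < n): keeps the loop kernel-reducible
def pvWhileBitsAux : Nat → Nat → List Int
  | _, 0 => []
  | 0, _ + 1 => []          -- unreachable: fuel ≥ n always holds
  | fuel + 1, n + 1 => (((n + 1) % 2 : Nat) : Int) :: pvWhileBitsAux fuel ((n + 1) / 2)

def pvWhileBits (n : Nat) : List Int := pvWhileBitsAux n n

-- body of the for-loop: digit value n → its 4-bit string
def pvDigitA (n : Int) : String :=
  let bits4 := (pvWhileBits n.toNat).reverse
  let l := List.replicate (4 - bits4.length) (0 : Int) ++ bits4
  PySem.Str.join "" (l.map PySem.Int.toStr)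

def byte2bits (s : String) : String :=
  -- int(x) raises ValueError on a non-digit char: Pre_ excludes that, so getD 0 is never read
  let int_n := (PySem.List.slice s.toList (some 2) none).map
      (fun c => (PySem.Int.ofChars? [c]).getD 0)
  let str_n4 := int_n.foldl (fun acc n => acc ++ [pvDigitA n]) []
  PySem.Str.join "" str_n4

-- ===== PORT B =====
def pvTable : PySem.Dict String String :=
  PySem.Dict.ofList [("0","0000"), ("1","0001"), ("2","0010"), ("3","0011"),
                     ("4","0100"), ("5","0101"), ("6","0110"), ("7","0111"),
                     ("8","1000"), ("9","1001")]

def byte2bits_alt (s : String) : String :=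
  -- _TABLE[c] raises KeyError on a non-digit char: Pre_ excludes that, so getD "" is never read
  PySem.Str.join "" ((PySem.List.slice s.toList (some 2) none).map
      (fun c => (pvTable.get? (String.ofList [c])).getD ""))

-- ===== PRECONDITION & SPEC =====
-- Pre_: every character after the first two is an ASCII digit; elsewhere A raises ValueError (int(x)).
def Pre_byte2bits (s : String) : Prop := (s.toList.drop 2).all PySem.Chars.isdigit = true
instance (s : String) : Decidable (Pre_byte2bits s) := by unfold Pre_byte2bits; infer_instance
def pvWitness_byte2bits : String := "0x1234"

def Spec_byte2bits (s : String) (out : String) : Prop := out = byte2bits_alt s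
instance (s : String) (out : String) : Decidable (Spec_byte2bits s out) := by unfold Spec_byte2bits; infer_instance

-- ===== CLAIM (what is proved, stated in full; the proofs are below) =====
def Claim_equal_byte2bits : Prop := ∀ (s : String), Dom_byte2bits s → Pre_byte2bits s → Spec_byte2bits s (byte2bits s)

-- ===== LEMMAS AND PROOFS =====
theorem pv_foldl_append (l : List Int) (acc : List String) :
    l.foldl (fun a n => a ++ [pvDigitA n]) acc = acc ++ l.map pvDigitA := by
  induction l generalizing acc with
  | nil => simp
  | cons x xs ih => simp [List.foldl, ih]

theorem pv_digit_eq (c : Char) (h : PySem.Chars.isdigit c = true) :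
    pvDigitA ((PySem.Int.ofChars? [c]).getD 0) = (pvTable.get? (String.ofList [c])).getD "" := by
  have hb : 48 ≤ c.toNat ∧ c.toNat ≤ 57 := by
    simpa [PySem.Chars.isdigit] using h
  obtain ⟨h1, h2⟩ := hb
  interval_cases hn : c.toNat <;> (rw [← Char.ofNat_toNat c, hn]; decide)

theorem byte2bits_spec : Claim_equal_byte2bits := by
  intro s _ hpre
  unfold Spec_byte2bits byte2bits byte2bits_alt
  simp only [pv_foldl_append, List.nil_append, List.map_map]
  refine congrArg (PySem.Str.join "") ?_
  apply List.map_congr_left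
  intro c hc
  have hd : PySem.Chars.isdigit c = true := by
    rw [Pre_byte2bits, List.all_eq_true] at hpre
    apply hpre
    have h2 : PySem.List.slice s.toList (some 2) none = s.toList.drop 2 := by
      have := PySem.List.slice_from_natCast s.toList 2
      simpa using this
    rw [h2] at hc
    exact hc
  exact pv_digit_eq c hd
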